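-- pv_equiv track=rewrite | github.com/JhoanESG/LaboratorioConjuntos | OperacionesEntreConjuntos.py | calcularDS
-- ===== SOURCE A (Python) =====
-- def calcularDS(conjuntos):
--     resultado = []
--     if len(conjuntos) < 2:
--
--         resultado = conjuntos
--
--     else:
--         repetidos = []
--         union = conjuntos[0]+conjuntos[1]
--
--         for element in conjuntos[0]:
--             if element in conjuntos[1] and element not in repetidos:
--                 repetidos.append(element)
--         # Nueva lista excluyendo los números a eliminar
--         conjuntos[1] = [element for element in union if element not in repetidos]
--         del conjuntos[0]
--         resultado = calcularDS(conjuntos)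
--
--     return resultado
-- ===== SOURCE B (Python) =====
-- def calcularDS(conjuntos):
--     # Iterative left fold with an accumulator and a hash-set intersection,
--     # replacing A's tail recursion and nested list-membership scans.
--     # Equivalence is about the RETURN value only: A mutates its argument, B does not.
--     if len(conjuntos) < 2:
--         return conjuntos
--     acc = conjuntos[0]
--     for s in conjuntos[1:]:
--         rep = set(acc) & set(s)
--         acc = [e for e in acc + s if e not in rep]
--     return [acc]
-- ===== Notes on version B (the rewrite author's own statement) =====
-- stated objective: faster
-- what changed: Replaces the tail recursion that rebuilds and mutates the argument list with an iterative left fold over the tail, and replaces the nested list-membership loop building 'repetidos' with a hash-set intersection, so membership tests are O(1); return value only (A mutates its argument, B does not).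
import Mathlib
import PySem

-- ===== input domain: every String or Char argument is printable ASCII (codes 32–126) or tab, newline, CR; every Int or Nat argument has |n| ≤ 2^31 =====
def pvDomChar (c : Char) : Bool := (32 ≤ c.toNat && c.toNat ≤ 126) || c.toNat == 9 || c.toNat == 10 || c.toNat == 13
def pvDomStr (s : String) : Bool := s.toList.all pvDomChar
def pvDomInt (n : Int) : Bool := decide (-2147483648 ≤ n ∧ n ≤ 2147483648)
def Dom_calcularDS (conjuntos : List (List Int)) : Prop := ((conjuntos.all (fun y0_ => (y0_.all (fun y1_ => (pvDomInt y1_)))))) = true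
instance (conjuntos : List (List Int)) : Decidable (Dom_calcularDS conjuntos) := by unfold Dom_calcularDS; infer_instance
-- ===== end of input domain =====

-- B replaces A's tail recursion (which mutates the argument) by an iterative fold with a
-- set intersection; equivalence is about the RETURN value only (A mutates its argument, B does not).

-- ===== PORT A =====
-- tail recursion of A; each step replaces the first two lists by their symmetric difference
def calcularDS (conjuntos : List (List Int)) : List (List Int) :=
  match conjuntos with
  | [] => conjuntos
  | [_] => conjuntos
  | a :: b :: rest =>
      let union := a ++ b
      let repetidos := a.foldl (fun rep element =>
        if b.contains element && !(rep.contains element) then rep ++ [element] else rep) []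
      calcularDS ((union.filter (fun element => !(repetidos.contains element))) :: rest)
termination_by conjuntos.length
decreasing_by simp

-- ===== PORT B =====
-- one step of B's loop: acc = [e for e in acc + s if e not in rep], rep = set(acc) & set(s)
def calcularDSStepB (acc s : List Int) : List Int :=
  let rep := PySem.Set.inter (PySem.Set.ofList acc) (PySem.Set.ofList s)
  (acc ++ s).filter (fun e => !(rep.contains e))

def calcularDS_alt (conjuntos : List (List Int)) : List (List Int) :=
  match conjuntos with
  | [] => conjuntos
  | [_] => conjuntos
  | a :: rest => [rest.foldl calcularDSStepB a]

-- ===== PRECONDITION & SPEC =====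
def Spec_calcularDS (conjuntos : List (List Int)) (out : List (List Int)) : Prop := out = calcularDS_alt conjuntos
instance (conjuntos : List (List Int)) (out : List (List Int)) : Decidable (Spec_calcularDS conjuntos out) := by unfold Spec_calcularDS; infer_instance

-- ===== CLAIM (what is proved, stated in full; the proofs are below) =====
def Claim_equal_calcularDS : Prop := ∀ (conjuntos : List (List Int)), Dom_calcularDS conjuntos → Spec_calcularDS conjuntos (calcularDS conjuntos)

-- ===== LEMMAS AND PROOFS =====

-- membership in A's 'repetidos' accumulator: exactly the elements of both lists (plus the seed)
theorem mem_repetidos (b : List Int) (a acc : List Int) (e : Int) :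
    e ∈ a.foldl (fun rep element =>
        if b.contains element && !(rep.contains element) then rep ++ [element] else rep) acc ↔
      e ∈ acc ∨ (e ∈ a ∧ e ∈ b) := by
  induction a generalizing acc with
  | nil => simp
  | cons x xs ih =>
      simp only [List.foldl_cons]
      rw [ih]
      by_cases hxb : x ∈ b <;> by_cases hxa : x ∈ acc <;>
        simp [hxb, hxa] <;> aesop

-- Bool form of mem_repetidos for the empty seed
theorem contains_repetidos (a b : List Int) (e : Int) :
    (a.foldl (fun rep element =>
        if b.contains element && !(rep.contains element) then rep ++ [element] else rep)
      []).contains e = (a.contains e && b.contains e) := by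
  rw [Bool.eq_iff_iff, List.contains_iff_mem, mem_repetidos]
  simp

-- A's step (the new head list it pushes) equals B's step
theorem stepA_eq_stepB (a b : List Int) :
    (a ++ b).filter (fun element =>
        !((a.foldl (fun rep element =>
            if b.contains element && !(rep.contains element) then rep ++ [element] else rep)
          []).contains element)) = calcularDSStepB a b := by
  unfold calcularDSStepB
  apply List.filter_congr
  intro e _
  rw [contains_repetidos]
  have h2 : (PySem.Set.inter (PySem.Set.ofList a) (PySem.Set.ofList b)).contains e
      = (a.contains e && b.contains e) := by simp [pysem]
  rw [h2]

-- main induction: A's recursion computes B's fold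
theorem calcularDS_eq_fold (rest : List (List Int)) (a : List Int) :
    calcularDS (a :: rest) = [rest.foldl calcularDSStepB a] := by
  induction rest generalizing a with
  | nil => simp [calcularDS]
  | cons b rs ih =>
      rw [calcularDS]
      simp only [stepA_eq_stepB, ih, List.foldl_cons]

-- ===== VERDICT (by name: the statement is the Claim_ definition above) =====
theorem calcularDS_spec : Claim_equal_calcularDS := by
  intro conjuntos _
  unfold Spec_calcularDS
  match conjuntos with
  | [] => simp [calcularDS, calcularDS_alt]
  | [_] => simp [calcularDS, calcularDS_alt]
  | a :: b :: rest =>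
      rw [calcularDS_eq_fold]
      rfl
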